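-- pv_equiv track=rewrite | github.com/CyrilMa/HawkEye | lines.py | get_bottom_line
-- ===== SOURCE A (Python) =====
-- bottom_margin = 20
--
-- bottom_delta = 40
--
-- max_y = 720
--
-- def get_bottom_line(lines):
--     """
--     :param lines
--     :return: index of the biggest line among the lines the horizontal lines at the bottom of the image
--     """
--     max_y1_y2 = 0
--     for i in range(len(lines)):
--         for x1, y1, x2, y2 in lines[i]:
--             if (x1-x2)**2 > 5*(y1-y2)**2:
--                 if max_y - bottom_margin > int((y1+y2)/2) > max_y1_y2:
--                     max_y1_y2 = int((y1+y2)/2)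
--
--     index = 0
--     max_line_size = 0
--     for i in range(len(lines)):
--         for x1, y1, x2, y2 in lines[i]:
--             if (x1-x2)**2 > 5*(y1-y2)**2:
--                 if max_y1_y2 + bottom_delta > int((y1+y2)/2) > max_y1_y2 - bottom_delta:
--                     line_size = (x1 - x2) ** 2 + (y1 - y2) ** 2
--                     if line_size > max_line_size:
--                         max_line_size = line_size
--                         index = i
--     return index
-- ===== SOURCE B (Python) =====
-- bottom_margin = 20
--
-- bottom_delta = 40
--
-- max_y = 720
--
-- def get_bottom_line(lines):
--     # Flatten once into (mid, size, i) candidates; compute the near-bottom max mid;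
--     # then SORT the candidates by size descending (stable) and return the first one
--     # whose mid lies in the band -- sort-then-scan instead of running-max tracking.
--     cands = [(int((y1 + y2) / 2), (x1 - x2) ** 2 + (y1 - y2) ** 2, i)
--              for i, line in enumerate(lines)
--              for x1, y1, x2, y2 in line
--              if (x1 - x2) ** 2 > 5 * (y1 - y2) ** 2]
--     m = max((mid for mid, _, _ in cands if 0 < mid < max_y - bottom_margin), default=0)
--     for mid, size, i in sorted(cands, key=lambda c: -c[1]):
--         if m - bottom_delta < mid < m + bottom_delta:
--             return i
--     return 0
-- ===== Notes on version B (the rewrite author's own statement) =====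
-- stated objective: alternative
-- what changed: Instead of A's two re-scans of the nested structure with a running strict-max accumulator, B flattens once into (mid, size, index) candidates, takes the near-bottom max mid, then SORTS the candidates by size descending (stable) and returns the index of the first one whose mid lies in the band.
import Mathlib
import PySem

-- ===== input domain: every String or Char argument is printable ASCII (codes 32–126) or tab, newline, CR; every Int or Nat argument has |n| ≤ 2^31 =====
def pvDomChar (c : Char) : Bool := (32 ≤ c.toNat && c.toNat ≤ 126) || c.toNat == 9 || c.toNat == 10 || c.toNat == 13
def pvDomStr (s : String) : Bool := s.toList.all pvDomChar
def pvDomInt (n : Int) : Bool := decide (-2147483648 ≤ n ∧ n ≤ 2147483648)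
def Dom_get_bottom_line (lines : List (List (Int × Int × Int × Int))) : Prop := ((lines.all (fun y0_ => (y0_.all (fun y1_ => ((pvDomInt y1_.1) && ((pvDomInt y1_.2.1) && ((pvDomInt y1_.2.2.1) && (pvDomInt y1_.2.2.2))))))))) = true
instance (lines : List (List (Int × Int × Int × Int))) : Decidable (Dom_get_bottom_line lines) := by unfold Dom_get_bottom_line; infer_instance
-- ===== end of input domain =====

-- B replaces A's running-max selection over two re-scans of the nested structure by: one flattening
-- pass into (mid, size, index) candidates, the near-bottom max of their mids, and a SORT of the
-- candidates by size descending (stable) followed by taking the first one in the band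
-- (objective: alternative, sort-then-scan selection).
-- int((y1+y2)/2) is exact truncating division here (|y| ≤ 2^31 < 2^52), ported as PySem.Int.truncdiv.

def pv_bottom_margin : Int := 20
def pv_bottom_delta : Int := 40
def pv_max_y : Int := 720

-- ===== PORT A =====
-- loop body of A's first pass (one sub-line, running max accumulator)
def aStep1 (acc : Int) (t : Int × Int × Int × Int) : Int :=
  match t with
  | (x1, y1, x2, y2) =>
    if (x1 - x2) ^ 2 > 5 * (y1 - y2) ^ 2 then
      if pv_max_y - pv_bottom_margin > PySem.Int.truncdiv (y1 + y2) 2 ∧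
         PySem.Int.truncdiv (y1 + y2) 2 > acc then
        PySem.Int.truncdiv (y1 + y2) 2
      else acc
    else acc

-- loop body of A's second pass (one sub-line, (index, max_line_size) accumulator)
def aStep2 (m : Int) (i : Int) (p : Int × Int) (t : Int × Int × Int × Int) : Int × Int :=
  match t with
  | (x1, y1, x2, y2) =>
    if (x1 - x2) ^ 2 > 5 * (y1 - y2) ^ 2 then
      if m + pv_bottom_delta > PySem.Int.truncdiv (y1 + y2) 2 ∧
         PySem.Int.truncdiv (y1 + y2) 2 > m - pv_bottom_delta then
        let line_size := (x1 - x2) ^ 2 + (y1 - y2) ^ 2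
        if line_size > p.2 then (i, line_size) else p
      else p
    else p

def get_bottom_line (lines : List (List (Int × Int × Int × Int))) : Int :=
  let max_y1_y2 :=
    (PySem.List.enumerate lines).foldl
      (fun acc q => q.2.foldl aStep1 acc) 0
  let r :=
    (PySem.List.enumerate lines).foldl
      (fun p q => q.2.foldl (aStep2 max_y1_y2 q.1) p) ((0 : Int), (0 : Int))
  r.1

-- ===== PORT B =====
-- candidate for one sub-line: (mid, size, index) if it passes the horizontal test
def bCand (i : Int) (t : Int × Int × Int × Int) : Option (Int × Int × Int) :=
  match t with
  | (x1, y1, x2, y2) =>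
    if (x1 - x2) ^ 2 > 5 * (y1 - y2) ^ 2 then
      some (PySem.Int.truncdiv (y1 + y2) 2, (x1 - x2) ^ 2 + (y1 - y2) ^ 2, i)
    else none

-- the generator filter of B's max(...) (all kept mids are > 0, so foldl max 0 is Python's max with default=0)
def bFilt (c : Int × Int × Int) : Option Int :=
  if 0 < c.1 ∧ c.1 < pv_max_y - pv_bottom_margin then some c.1 else none

-- the band test of B's final for-loop over the sorted candidates
def bBand (m : Int) (c : Int × Int × Int) : Bool :=
  decide (m - pv_bottom_delta < c.1) && decide (c.1 < m + pv_bottom_delta)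

def get_bottom_line_alt (lines : List (List (Int × Int × Int × Int))) : Int :=
  let cands := (PySem.List.enumerate lines).flatMap (fun q => q.2.filterMap (bCand q.1))
  let m := (cands.filterMap bFilt).foldl max 0
  -- 'for mid, size, i in sorted(cands, key=lambda c: -c[1]): if band: return i' / 'return 0'
  match (PySem.List.sorted cands (fun c => -c.2.1)).find? (bBand m) with
  | some c => c.2.2
  | none => 0

-- ===== PRECONDITION & SPEC =====
def Spec_get_bottom_line (lines : List (List (Int × Int × Int × Int))) (out : Int) : Prop := out = get_bottom_line_alt lines
instance (lines : List (List (Int × Int × Int × Int))) (out : Int) : Decidable (Spec_get_bottom_line lines out) := by unfold Spec_get_bottom_line; infer_instance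

-- ===== CLAIM (what is proved, stated in full; the proofs are below) =====
def Claim_equal_get_bottom_line : Prop := ∀ (lines : List (List (Int × Int × Int × Int))), Dom_get_bottom_line lines → Spec_get_bottom_line lines (get_bottom_line lines)

-- ===== LEMMAS AND PROOFS =====

-- B's in-band selection step over the flat candidate list (A's second pass reduces to it)
def bStep2 (m : Int) (p : Int × Int) (c : Int × Int × Int) : Int × Int :=
  match c with
  | (mid, size, i) =>
    if m - pv_bottom_delta < mid ∧ mid < m + pv_bottom_delta ∧ size > p.2 then (i, size) else p

-- A's first-pass body, pointwise: update-if-bigger-and-in-band = max over the filtered candidate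
lemma aStep1_eq_max (i : Int) (t : Int × Int × Int × Int) (a : Int) (ha : 0 ≤ a) :
    aStep1 a t = match (bCand i t).bind bFilt with
                 | some m => max a m
                 | none => a := by
  obtain ⟨x1, y1, x2, y2⟩ := t
  simp only [aStep1, bCand, bFilt, pv_max_y, pv_bottom_margin]
  by_cases h1 : (x1 - x2) ^ 2 > 5 * (y1 - y2) ^ 2
  · simp only [if_pos h1, Option.bind_some]
    by_cases h2 : 0 < PySem.Int.truncdiv (y1 + y2) 2 ∧ PySem.Int.truncdiv (y1 + y2) 2 < 720 - 20
    · simp only [if_pos h2]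
      split_ifs with h3 <;> simp only [max_def] <;> split_ifs <;> omega
    · simp only [if_neg h2]
      rcases not_and_or.mp h2 with h | h <;>
        · split_ifs with h3 <;> omega
  · simp [h1]

lemma foldl_aStep1_eq (i : Int) (l : List (Int × Int × Int × Int)) :
    ∀ a : Int, 0 ≤ a → l.foldl aStep1 a = ((l.filterMap (bCand i)).filterMap bFilt).foldl max a := by
  induction l with
  | nil => intro a _; rfl
  | cons t l ih =>
    intro a ha
    have hpt := aStep1_eq_max i t a ha
    rw [List.foldl_cons, List.filterMap_cons]
    cases hc : (bCand i t) with
    | none =>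
      rw [hc] at hpt; simp at hpt
      rw [hpt, ih a ha]
    | some c =>
      rw [hc] at hpt; simp only [Option.bind_some] at hpt
      cases hf : bFilt c with
      | none => rw [hf] at hpt; simp at hpt; rw [hpt, List.filterMap_cons, hf, ih a ha]
      | some m =>
        rw [hf] at hpt; simp at hpt
        rw [hpt, List.filterMap_cons, hf, List.foldl_cons, ih _ (le_trans ha (le_max_left a m))]

lemma outer1 (ps : List (Int × List (Int × Int × Int × Int))) :
    ∀ a : Int, 0 ≤ a →
      ps.foldl (fun acc q => q.2.foldl aStep1 acc) a
        = ((ps.flatMap (fun q => q.2.filterMap (bCand q.1))).filterMap bFilt).foldl max a := by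
  induction ps with
  | nil => intro a _; rfl
  | cons q ps ih =>
    intro a ha
    rw [List.foldl_cons, List.flatMap_cons, List.filterMap_append, List.foldl_append,
        foldl_aStep1_eq q.1 q.2 a ha]
    exact ih _ (le_trans ha (PySem.List.le_foldl_max _ _).1)

-- A's second-pass body, pointwise against the flat in-band selection step
lemma aStep2_eq (m i : Int) (p : Int × Int) (t : Int × Int × Int × Int) :
    aStep2 m i p t = match bCand i t with
                     | some c => bStep2 m p c
                     | none => p := by
  obtain ⟨x1, y1, x2, y2⟩ := t
  simp only [aStep2, bCand, bStep2]
  split_ifs with h1 h2 h3 h3 <;> simp_all <;> intros <;> omega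

lemma foldl_aStep2_eq (m i : Int) (l : List (Int × Int × Int × Int)) :
    ∀ p : Int × Int, l.foldl (aStep2 m i) p = (l.filterMap (bCand i)).foldl (bStep2 m) p := by
  induction l with
  | nil => intro p; rfl
  | cons t l ih =>
    intro p
    rw [List.foldl_cons, List.filterMap_cons, aStep2_eq m i p t]
    cases hc : bCand i t with
    | none => simp only []; exact ih p
    | some c => simp only []; rw [List.foldl_cons]; exact ih _

lemma outer2 (m : Int) (ps : List (Int × List (Int × Int × Int × Int))) :
    ∀ p : Int × Int,
      ps.foldl (fun p q => q.2.foldl (aStep2 m q.1) p) p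
        = (ps.flatMap (fun q => q.2.filterMap (bCand q.1))).foldl (bStep2 m) p := by
  induction ps with
  | nil => intro p; rfl
  | cons q ps ih =>
    intro p
    rw [List.foldl_cons, List.flatMap_cons, List.foldl_append, foldl_aStep2_eq m q.1 q.2 p]
    exact ih _

-- every candidate has positive size: the horizontal test forces (x1-x2)^2 > 0
lemma bCand_pos (i : Int) (t : Int × Int × Int × Int) (c : Int × Int × Int)
    (h : bCand i t = some c) : 0 < c.2.1 := by
  obtain ⟨x1, y1, x2, y2⟩ := t
  simp only [bCand] at h
  split_ifs at h with h1
  · cases h; simp only []; nlinarith [sq_nonneg (y1 - y2)]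

lemma cands_pos (lines : List (List (Int × Int × Int × Int))) :
    ∀ c ∈ (PySem.List.enumerate lines).flatMap (fun q => q.2.filterMap (bCand q.1)), 0 < c.2.1 := by
  intro c hc
  rw [List.mem_flatMap] at hc
  obtain ⟨q, _, hq⟩ := hc
  rw [List.mem_filterMap] at hq
  obtain ⟨t, _, ht⟩ := hq
  exact bCand_pos q.1 t c ht

-- result of the first in-band candidate of a list ((0,0) if none): B's sorted scan, as a pair
def selF (m : Int) (s : List (Int × Int × Int)) : Int × Int :=
  match s.find? (bBand m) with
  | some c => (c.2.2, c.2.1)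
  | none => ((0 : Int), (0 : Int))

lemma selF_cons (m : Int) (y : Int × Int × Int) (l : List (Int × Int × Int)) :
    selF m (y :: l) = if bBand m y then (y.2.2, y.2.1) else selF m l := by
  by_cases h : bBand m y
  · simp [selF, List.find?_cons_of_pos h, h]
  · simp [selF, List.find?_cons_of_neg (by simpa using h), h]

lemma selF_snd (m : Int) (s : List (Int × Int × Int)) :
    (selF m s).2 = 0 ∨ ∃ t ∈ s, (selF m s).2 = t.2.1 := by
  unfold selF
  cases hf : s.find? (bBand m) with
  | none => exact Or.inl rfl
  | some t => exact Or.inr ⟨t, List.mem_of_find?_eq_some hf, rfl⟩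

-- size-descending order and the insertion test of sorted(cands, key=lambda c: -c[1])
lemma insertBy_pairwise (c : Int × Int × Int) (s : List (Int × Int × Int))
    (hs : s.Pairwise (fun a b => b.2.1 ≤ a.2.1)) :
    (PySem.List.insertBy (fun a b => decide ((-a.2.1 : Int) < -b.2.1)) c s).Pairwise
      (fun a b => b.2.1 ≤ a.2.1) := by
  induction s with
  | nil => simp [PySem.List.insertBy]
  | cons y ys ih =>
    rw [List.pairwise_cons] at hs
    obtain ⟨hy, hys⟩ := hs
    simp only [PySem.List.insertBy]
    split_ifs with hb
    · simp only [decide_eq_true_eq] at hb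
      refine List.pairwise_cons.mpr ⟨?_, List.pairwise_cons.mpr ⟨hy, hys⟩⟩
      intro b hb'
      rcases List.mem_cons.mp hb' with rfl | hmem
      · omega
      · have := hy b hmem; omega
    · simp only [decide_eq_true_eq, not_lt] at hb
      refine List.pairwise_cons.mpr ⟨?_, ih hys⟩
      intro b hb'
      rcases (PySem.List.mem_insertBy _ c b ys).mp hb' with rfl | hmem
      · omega
      · exact hy b hmem

-- inserting one candidate into the sorted list moves the first-in-band selection
-- exactly one step of the strict running-max update
lemma selF_insertBy (m : Int) (c : Int × Int × Int) (hc : 0 < c.2.1) :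
    ∀ s : List (Int × Int × Int), s.Pairwise (fun a b => b.2.1 ≤ a.2.1) →
      selF m (PySem.List.insertBy (fun a b => decide ((-a.2.1 : Int) < -b.2.1)) c s)
        = bStep2 m (selF m s) c := by
  intro s
  induction s with
  | nil =>
    intro _
    simp only [PySem.List.insertBy, selF_cons]
    have h0 : selF m ([] : List (Int × Int × Int)) = ((0 : Int), (0 : Int)) := rfl
    rw [h0]
    by_cases hPc : bBand m c = true
    · rw [if_pos hPc]
      obtain ⟨mid, size, i⟩ := c
      simp only [bBand, Bool.and_eq_true, decide_eq_true_eq] at hPc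
      simp only [] at hc
      simp only [bStep2]
      rw [if_pos ⟨hPc.1, hPc.2, by simpa using hc⟩]
    · rw [if_neg hPc]
      obtain ⟨mid, size, i⟩ := c
      simp only [bBand, Bool.and_eq_true, decide_eq_true_eq] at hPc
      simp only [bStep2]
      rw [if_neg (fun hcon => hPc ⟨hcon.1, hcon.2.1⟩)]
  | cons y ys ih =>
    intro hp
    rw [List.pairwise_cons] at hp
    obtain ⟨hy, hys⟩ := hp
    simp only [PySem.List.insertBy]
    by_cases hb : ((-c.2.1 : Int) < -y.2.1)
    · -- c's size is strictly larger than y's, hence than every size in y :: ys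
      rw [if_pos (decide_eq_true hb)]
      rw [selF_cons]
      by_cases hPc : bBand m c = true
      · rw [if_pos hPc]
        have hle : (selF m (y :: ys)).2 < c.2.1 := by
          rcases selF_snd m (y :: ys) with h0 | ⟨t, ht, hts⟩
          · omega
          · have htle : t.2.1 ≤ y.2.1 := by
              rcases List.mem_cons.mp ht with rfl | hmem
              · exact le_rfl
              · exact hy t hmem
            omega
        obtain ⟨mid, size, i⟩ := c
        simp only [bBand, Bool.and_eq_true, decide_eq_true_eq] at hPc
        simp only [bStep2]
        rw [if_pos ⟨hPc.1, hPc.2, by simpa using hle⟩]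
      · rw [if_neg hPc]
        obtain ⟨mid, size, i⟩ := c
        simp only [bBand, Bool.and_eq_true, decide_eq_true_eq] at hPc
        simp only [bStep2]
        rw [if_neg (fun hcon => hPc ⟨hcon.1, hcon.2.1⟩)]
    · -- c's size is at most y's: y stays in front of the insertion
      rw [if_neg (by simpa using hb)]
      rw [selF_cons, selF_cons]
      by_cases hPy : bBand m y = true
      · rw [if_pos hPy, if_pos hPy]
        obtain ⟨mid, size, i⟩ := c
        simp only [] at hb
        simp only [bStep2]
        rw [if_neg ?hneg]
        case hneg =>
          intro hcon
          have h3 := hcon.2.2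
          simp only [] at h3
          omega
      · rw [if_neg hPy, if_neg hPy]
        exact ih hys

-- the whole insertion sort: first-in-band of the sorted accumulator evolves by bStep2
lemma selF_foldl (m : Int) :
    ∀ (cs : List (Int × Int × Int)) (acc : List (Int × Int × Int)),
      acc.Pairwise (fun a b => b.2.1 ≤ a.2.1) → (∀ c ∈ cs, 0 < c.2.1) →
      selF m (cs.foldl (fun a c =>
          PySem.List.insertBy (fun a b => decide ((-a.2.1 : Int) < -b.2.1)) c a) acc)
        = cs.foldl (bStep2 m) (selF m acc) := by
  intro cs
  induction cs with
  | nil => intro acc _ _; rfl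
  | cons c cs ih =>
    intro acc hacc hpos
    rw [List.foldl_cons, List.foldl_cons,
        ih _ (insertBy_pairwise c acc hacc) (fun d hd => hpos d (List.mem_cons_of_mem c hd)),
        selF_insertBy m c (hpos c List.mem_cons_self) acc hacc]

-- ===== VERDICT (by name: the statement is the Claim_ definition above) =====
theorem get_bottom_line_spec : Claim_equal_get_bottom_line := by
  intro lines _
  unfold Spec_get_bottom_line
  simp only [get_bottom_line, get_bottom_line_alt]
  rw [outer1 (PySem.List.enumerate lines) 0 le_rfl,
      outer2 _ (PySem.List.enumerate lines) ((0 : Int), (0 : Int))]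
  have hsel : (match (PySem.List.sorted
        ((PySem.List.enumerate lines).flatMap (fun q => q.2.filterMap (bCand q.1)))
        (fun c => -c.2.1)).find?
        (bBand ((((PySem.List.enumerate lines).flatMap
            (fun q => q.2.filterMap (bCand q.1))).filterMap bFilt).foldl max 0)) with
      | some c => c.2.2
      | none => (0 : Int))
      = (selF ((((PySem.List.enumerate lines).flatMap
            (fun q => q.2.filterMap (bCand q.1))).filterMap bFilt).foldl max 0)
          (PySem.List.sorted
            ((PySem.List.enumerate lines).flatMap (fun q => q.2.filterMap (bCand q.1)))
            (fun c => -c.2.1))).1 := by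
    unfold selF
    cases hf : (PySem.List.sorted
        ((PySem.List.enumerate lines).flatMap (fun q => q.2.filterMap (bCand q.1)))
        (fun c => -c.2.1)).find?
        (bBand ((((PySem.List.enumerate lines).flatMap
            (fun q => q.2.filterMap (bCand q.1))).filterMap bFilt).foldl max 0)) <;> simp
  rw [hsel, PySem.List.sorted_eq_foldl_insertBy,
      selF_foldl _ _ [] (by simp) (cands_pos lines)]
  rfl
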